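-- pv_equiv track=rewrite | github.com/ptrckgl/chess-visualisation-tools | square_location.py | get_square_notation
-- ===== SOURCE A (Python) =====
-- def get_square_notation(index):
--     """The way the squares are in this program starts from top left and goes down, then right."""
--     cols = ['a', 'b', 'c', 'd', 'e', 'f', 'g', 'h']
--     rows = ['8', '7', '6', '5', '4', '3', '2', '1']
--
--     if PERSPECTIVE == 'B':
--         # We are looking from the black perspective - flip everything
--         cols = cols[::-1]
--         rows = rows[::-1]
--
--     # Getting the correct column
--     col = 0
--     while index > 7:
--         index -= 8
--         col += 1
--
--     return f"{cols[col]}{rows[index]}"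
--
-- PERSPECTIVE = 'W'
-- ===== SOURCE B (Python) =====
-- PERSPECTIVE = 'W'
--
--
-- def get_square_notation(index):
--     """The way the squares are in this program starts from top left and goes down, then right."""
--     cols = 'abcdefgh'
--     rows = '87654321'
--
--     if PERSPECTIVE == 'B':
--         cols = cols[::-1]
--         rows = rows[::-1]
--
--     col, row = divmod(index, 8)
--     return cols[col] + rows[row]
-- ===== Notes on version B (the rewrite author's own statement) =====
-- stated objective: idiomatic
-- what changed: Replaces the repeated-subtraction while loop with a single divmod(index, 8) and indexes two strings instead of building two character lists.
-- intended difference: For negative indices -8..-1 A's loop body never runs, leaving the column counter untouched so Python's negative wraparound yields column 'a' (e.g. 'a1' at -1), while B's divmod gives the last column 'h' (e.g. 'h1'); neither column is specified for out-of-board indices, but B's is the consistent continuation of the divmod layout. — e.g. on get_square_notation(-1): A returns "a1", B returns "h1"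
import Mathlib
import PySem

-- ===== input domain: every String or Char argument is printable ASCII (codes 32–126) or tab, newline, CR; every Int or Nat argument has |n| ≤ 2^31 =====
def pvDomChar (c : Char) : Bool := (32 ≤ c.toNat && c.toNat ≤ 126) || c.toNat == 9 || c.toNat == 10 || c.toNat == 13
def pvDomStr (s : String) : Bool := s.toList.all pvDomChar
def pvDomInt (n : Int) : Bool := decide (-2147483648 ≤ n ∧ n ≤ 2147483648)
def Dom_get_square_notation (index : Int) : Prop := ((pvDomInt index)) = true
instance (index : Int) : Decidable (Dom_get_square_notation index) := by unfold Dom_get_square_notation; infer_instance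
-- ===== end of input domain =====

-- ===== PORT A =====
-- B replaces A's repeated-subtraction while loop with one divmod and indexes string literals;
-- A and B differ only on out-of-board negative indices (see D_ below); objective: idiomatic.
def pvPERSPECTIVE : String := "W"

-- A's loop: while index > 7: index -= 8; col += 1
def pvLoopA (index col : Int) : Int × Int :=
  if index > 7 then pvLoopA (index - 8) (col + 1) else (index, col)
termination_by (index - 7).toNat
decreasing_by omega

def get_square_notation (index : Int) : String :=
  let cols : List Char := ['a', 'b', 'c', 'd', 'e', 'f', 'g', 'h']
  let rows : List Char := ['8', '7', '6', '5', '4', '3', '2', '1']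
  let cols := if pvPERSPECTIVE == "B" then ((PySem.List.slice? cols none none (-1)).getD []) else cols
  let rows := if pvPERSPECTIVE == "B" then ((PySem.List.slice? rows none none (-1)).getD []) else rows
  let (index, col) := pvLoopA index 0
  -- f"{cols[col]}{rows[index]}"; the IndexError cases are excluded by Pre_, the default is never reached there
  String.ofList [(PySem.List.pyGet? cols col).getD '?', (PySem.List.pyGet? rows index).getD '?']

-- ===== PORT B =====
def get_square_notation_alt (index : Int) : String :=
  let cols : String := "abcdefgh"
  let rows : String := "87654321"
  let cols := if pvPERSPECTIVE == "B" then ((PySem.Str.slice? cols none none (-1)).getD "") else cols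
  let rows := if pvPERSPECTIVE == "B" then ((PySem.Str.slice? rows none none (-1)).getD "") else rows
  let col := PySem.Int.floordiv index 8
  let row := PySem.Int.mod index 8
  -- cols[col] + rows[row]; IndexError cases excluded by Pre_, default never reached there
  String.ofList [(PySem.Str.pyGet? cols col).getD '?', (PySem.Str.pyGet? rows row).getD '?']

-- ===== PRECONDITION & SPEC =====
-- Pre_: exactly the inputs on which the Python A returns (outside it A's list indexing raises IndexError)
def Pre_get_square_notation (index : Int) : Prop := -8 ≤ index ∧ index ≤ 63
instance (index : Int) : Decidable (Pre_get_square_notation index) := by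
  unfold Pre_get_square_notation; infer_instance
def pvWitness_get_square_notation : Int := 10

-- On negative indices -8..-1 A's loop body never runs, so Python's negative wraparound yields column 'a'
-- (e.g. 'a1' at -1), while B's divmod gives column 'h' (e.g. 'h1'); neither column is specified for
-- out-of-board indices, and B's is the consistent continuation of the divmod layout.
def D_get_square_notation (index : Int) : Prop := index < 0
instance (index : Int) : Decidable (D_get_square_notation index) := by
  unfold D_get_square_notation; infer_instance

def Spec_get_square_notation (index : Int) (out : String) : Prop :=
  ¬ D_get_square_notation index → out = get_square_notation_alt index
instance (index : Int) (out : String) : Decidable (Spec_get_square_notation index out) := by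
  unfold Spec_get_square_notation; infer_instance

def pvDiffWitness_get_square_notation : Int := -1
def pvDiffWitnessOut_get_square_notation : String × String := ("a1", "h1")

-- ===== CLAIM (what is proved, stated in full; the proofs are below) =====
def Claim_unchanged_get_square_notation : Prop := ∀ (index : Int), Dom_get_square_notation index → Pre_get_square_notation index → Spec_get_square_notation index (get_square_notation index)
def Claim_changed_get_square_notation : Prop := Dom_get_square_notation (pvDiffWitness_get_square_notation) ∧ Pre_get_square_notation (pvDiffWitness_get_square_notation) ∧ D_get_square_notation (pvDiffWitness_get_square_notation) ∧ get_square_notation (pvDiffWitness_get_square_notation) = pvDiffWitnessOut_get_square_notation.1 ∧ get_square_notation_alt (pvDiffWitness_get_square_notation) = pvDiffWitnessOut_get_square_notation.2 ∧ pvDiffWitnessOut_get_square_notation.1 ≠ pvDiffWitnessOut_get_square_notation.2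
def Claim_exact_get_square_notation : Prop := ∀ (index : Int), Dom_get_square_notation index → Pre_get_square_notation index → D_get_square_notation index → get_square_notation index ≠ get_square_notation_alt index

-- ===== LEMMAS AND PROOFS =====
-- A's while loop computes divmod by 8 on nonnegative input …
theorem pvLoopA_eval (i c : Int) (h : 0 ≤ i) : pvLoopA i c = (i % 8, c + i / 8) := by
  rw [pvLoopA]
  split
  · rw [pvLoopA_eval (i - 8) (c + 1) (by omega)]
    refine Prod.ext (by simp) ?_
    simp
    omega
  · simp
    exact ⟨by omega, by omega⟩
termination_by (i - 7).toNat
decreasing_by omega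

-- … and does nothing when index ≤ 7 (in particular on negative input)
theorem pvLoopA_le (i c : Int) (h : i ≤ 7) : pvLoopA i c = (i, c) := by
  rw [pvLoopA, if_neg (by omega)]

-- ===== VERDICT (by name: the statement is the Claim_ definition above) =====
theorem get_square_notation_spec : Claim_unchanged_get_square_notation := by
  intro index _ hpre hnd
  unfold D_get_square_notation at hnd
  obtain ⟨h1, h2⟩ := hpre
  have h0 : 0 ≤ index := by omega
  show get_square_notation index = get_square_notation_alt index
  simp only [get_square_notation, get_square_notation_alt, pvLoopA_eval index 0 h0]
  interval_cases index <;> decide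

theorem get_square_notation_changed : Claim_changed_get_square_notation := by
  unfold Claim_changed_get_square_notation
  refine ⟨by decide, by decide, by decide, ?_, by decide, by decide⟩
  show get_square_notation (-1) = "a1"
  simp only [get_square_notation, pvLoopA_le (-1) 0 (by omega)]
  decide

theorem get_square_notation_tight : Claim_exact_get_square_notation := by
  intro index _ hpre hd
  unfold D_get_square_notation at hd
  obtain ⟨h1, _⟩ := hpre
  simp only [get_square_notation, get_square_notation_alt, pvLoopA_le index 0 (by omega)]
  interval_cases index <;> decide
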